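-- pv_equiv track=rewrite | github.com/writegsqword/major-percentage-thing | main.py | remap_flattened
-- ===== SOURCE A (Python) =====
-- known_majors = [
--     ["Mathehatics", "Math"],
--     ["Biochemistry", "BioChem"],
--     ["Anthropology", "Anth"],
--     ["Linguistics", "ling"],
--     'Music',
--     "Business",
--     ["Aerospace Engineering", "Aerospace"],
--     "Physics",
--     "Archeology",
--     "English",
--     ["Political Science", "PolSci"],
--     ["Cognitive Science","CogSci"],
--     ["Literature", "Lit"],
--     ["Computer Science", "CS", "CSE", "CompSci"],
--     ["Electrical Engineering", "EE"],
--     ["Computer engineering", "CE"],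
--     ["Data Science", "DS"],
--     "Data analysis",
--     ["Statistics", "Stats"],
--     ["Psychology","Psych"],
--     ["Communications", "Comm"],
--     ["Biology","Bio"],
--     ["Chemistry", "Chem"],
--     ["Economics", "Econ"],
--     ["Environmental Systems", "ES"],
--     "Art",
--     ["Math-Computer Science", "Math-CS", "Math-CompSci"],
--     "Neuroscience",
--     "Sociology",
--     "Undeclared",
--     "Studio",
--     ["ICAM"]
-- ]
--
-- def remap_flattened(major):
--     for m in known_majors:
--         if type(m) != list:
--             if major == m:
--                 return m
--             continue
--         for m2 in m:
--             if major == m2: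
--                 return m[0]
--     return "Unknown"
-- ===== SOURCE B (Python) =====
-- # Flat alias -> canonical table written out once; the function is a single dict lookup.
-- _CANONICAL = {
--     'Mathehatics': 'Mathehatics',
--     'Math': 'Mathehatics',
--     'Biochemistry': 'Biochemistry',
--     'BioChem': 'Biochemistry',
--     'Anthropology': 'Anthropology',
--     'Anth': 'Anthropology',
--     'Linguistics': 'Linguistics',
--     'ling': 'Linguistics',
--     'Music': 'Music',
--     'Business': 'Business',
--     'Aerospace Engineering': 'Aerospace Engineering',
--     'Aerospace': 'Aerospace Engineering',
--     'Physics': 'Physics',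
--     'Archeology': 'Archeology',
--     'English': 'English',
--     'Political Science': 'Political Science',
--     'PolSci': 'Political Science',
--     'Cognitive Science': 'Cognitive Science',
--     'CogSci': 'Cognitive Science',
--     'Literature': 'Literature',
--     'Lit': 'Literature',
--     'Computer Science': 'Computer Science',
--     'CS': 'Computer Science',
--     'CSE': 'Computer Science',
--     'CompSci': 'Computer Science',
--     'Electrical Engineering': 'Electrical Engineering',
--     'EE': 'Electrical Engineering',
--     'Computer engineering': 'Computer engineering',
--     'CE': 'Computer engineering',
--     'Data Science': 'Data Science',
--     'DS': 'Data Science',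
--     'Data analysis': 'Data analysis',
--     'Statistics': 'Statistics',
--     'Stats': 'Statistics',
--     'Psychology': 'Psychology',
--     'Psych': 'Psychology',
--     'Communications': 'Communications',
--     'Comm': 'Communications',
--     'Biology': 'Biology',
--     'Bio': 'Biology',
--     'Chemistry': 'Chemistry',
--     'Chem': 'Chemistry',
--     'Economics': 'Economics',
--     'Econ': 'Economics',
--     'Environmental Systems': 'Environmental Systems',
--     'ES': 'Environmental Systems',
--     'Art': 'Art',
--     'Math-Computer Science': 'Math-Computer Science',
--     'Math-CS': 'Math-Computer Science',
--     'Math-CompSci': 'Math-Computer Science',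
--     'Neuroscience': 'Neuroscience',
--     'Sociology': 'Sociology',
--     'Undeclared': 'Undeclared',
--     'Studio': 'Studio',
--     'ICAM': 'ICAM',
-- }
--
-- def remap_flattened(major):
--     return _CANONICAL.get(major, "Unknown")
-- ===== Notes on version B (the rewrite author's own statement) =====
-- stated objective: simpler
-- what changed: Replaces the nested first-match scan over the mixed string/list known_majors table with a precomputed flat alias-to-canonical dict, so the function body is a single dict.get(major, 'Unknown').
import Mathlib
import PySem

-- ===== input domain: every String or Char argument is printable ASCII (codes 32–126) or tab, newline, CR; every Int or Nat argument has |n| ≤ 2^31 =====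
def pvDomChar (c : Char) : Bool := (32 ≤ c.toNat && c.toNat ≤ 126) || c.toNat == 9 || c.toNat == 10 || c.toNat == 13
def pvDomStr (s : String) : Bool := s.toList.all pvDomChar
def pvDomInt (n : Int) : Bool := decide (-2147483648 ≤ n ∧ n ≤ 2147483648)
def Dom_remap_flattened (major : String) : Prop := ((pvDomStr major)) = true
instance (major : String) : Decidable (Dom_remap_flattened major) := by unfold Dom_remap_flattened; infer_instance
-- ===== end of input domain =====

-- B replaces A's nested first-match scan over the mixed string/list table with a precomputed
-- flat alias→canonical dict, so the function body is one lookup with default "Unknown" (objective: simpler).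

-- ===== PORT A =====
-- A known_majors entry is either a plain string or a list of aliases (Python mixes both).
inductive PvEntry
  | str : String → PvEntry
  | lst : List String → PvEntry
deriving Repr, DecidableEq

-- the module-level constant known_majors used by A
def known_majors : List PvEntry := [
  .lst ["Mathehatics", "Math"],
  .lst ["Biochemistry", "BioChem"],
  .lst ["Anthropology", "Anth"],
  .lst ["Linguistics", "ling"],
  .str "Music",
  .str "Business",
  .lst ["Aerospace Engineering", "Aerospace"],
  .str "Physics",
  .str "Archeology",
  .str "English",
  .lst ["Political Science", "PolSci"],
  .lst ["Cognitive Science", "CogSci"],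
  .lst ["Literature", "Lit"],
  .lst ["Computer Science", "CS", "CSE", "CompSci"],
  .lst ["Electrical Engineering", "EE"],
  .lst ["Computer engineering", "CE"],
  .lst ["Data Science", "DS"],
  .str "Data analysis",
  .lst ["Statistics", "Stats"],
  .lst ["Psychology", "Psych"],
  .lst ["Communications", "Comm"],
  .lst ["Biology", "Bio"],
  .lst ["Chemistry", "Chem"],
  .lst ["Economics", "Econ"],
  .lst ["Environmental Systems", "ES"],
  .str "Art",
  .lst ["Math-Computer Science", "Math-CS", "Math-CompSci"],
  .str "Neuroscience",
  .str "Sociology",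
  .str "Undeclared",
  .str "Studio",
  .lst ["ICAM"]]

-- inner loop: for m2 in m: if major == m2: return m[0]   (m[0] via headD, exact here since
-- every list entry of known_majors is nonempty)
def pvInnerA (major : String) (m : List String) : List String → Option String
  | [] => none
  | m2 :: rest => if major == m2 then some (m.headD "") else pvInnerA major m rest

-- outer loop over the entries
def pvLoopA (major : String) : List PvEntry → String
  | [] => "Unknown"
  | .str m :: rest => if major == m then m else pvLoopA major rest
  | .lst m :: rest =>
      match pvInnerA major m m with
      | some r => r
      | none => pvLoopA major rest

def remap_flattened (major : String) : String := pvLoopA major known_majors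

-- ===== PORT B =====
-- the literal flat table _CANONICAL from Source B (insertion order as written there)
def pvCanonical : PySem.Dict String String := PySem.Dict.mk [("Mathehatics", "Mathehatics"), ("Math", "Mathehatics"), ("Biochemistry", "Biochemistry"), ("BioChem", "Biochemistry"), ("Anthropology", "Anthropology"), ("Anth", "Anthropology"), ("Linguistics", "Linguistics"), ("ling", "Linguistics"), ("Music", "Music"), ("Business", "Business"), ("Aerospace Engineering", "Aerospace Engineering"), ("Aerospace", "Aerospace Engineering"), ("Physics", "Physics"), ("Archeology", "Archeology"), ("English", "English"), ("Political Science", "Political Science"), ("PolSci", "Political Science"), ("Cognitive Science", "Cognitive Science"), ("CogSci", "Cognitive Science"), ("Literature", "Literature"), ("Lit", "Literature"), ("Computer Science", "Computer Science"), ("CS", "Computer Science"), ("CSE", "Computer Science"), ("CompSci", "Computer Science"), ("Electrical Engineering", "Electrical Engineering"), ("EE", "Electrical Engineering"), ("Computer engineering", "Computer engineering"), ("CE", "Computer engineering"), ("Data Science", "Data Science"), ("DS", "Data Science"), ("Data analysis", "Data analysis"), ("Statistics", "Statistics"), ("Stats", "Statistics"), ("Psychology", "Psychology"), ("Psych", "Psychology"),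 ("Communications", "Communications"), ("Comm", "Communications"), ("Biology", "Biology"), ("Bio", "Biology"), ("Chemistry", "Chemistry"), ("Chem", "Chemistry"), ("Economics", "Economics"), ("Econ", "Economics"), ("Environmental Systems", "Environmental Systems"), ("ES", "Environmental Systems"), ("Art", "Art"), ("Math-Computer Science", "Math-Computer Science"), ("Math-CS", "Math-Computer Science"), ("Math-CompSci", "Math-Computer Science"), ("Neuroscience", "Neuroscience"), ("Sociology", "Sociology"), ("Undeclared", "Undeclared"), ("Studio", "Studio"), ("ICAM", "ICAM")]

def remap_flattened_alt (major : String) : String := pvCanonical.getD major "Unknown"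

-- ===== PRECONDITION & SPEC =====
def Spec_remap_flattened (major : String) (out : String) : Prop := out = remap_flattened_alt major
instance (major : String) (out : String) : Decidable (Spec_remap_flattened major out) := by unfold Spec_remap_flattened; infer_instance

-- ===== CLAIM (what is proved, stated in full; the proofs are below) =====
def Claim_equal_remap_flattened : Prop := ∀ (major : String), Dom_remap_flattened major → Spec_remap_flattened major (remap_flattened major)

-- ===== LEMMAS AND PROOFS =====

-- ===== VERDICT (by name: the statement is the Claim_ definition above) =====
set_option maxRecDepth 10000 in
set_option maxHeartbeats 2000000 in
theorem remap_flattened_spec : Claim_equal_remap_flattened := by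
  intro major _
  unfold Spec_remap_flattened
  by_cases h0 : major = "Mathehatics"
  · subst h0; decide
  by_cases h1 : major = "Math"
  · subst h1; decide
  by_cases h2 : major = "Biochemistry"
  · subst h2; decide
  by_cases h3 : major = "BioChem"
  · subst h3; decide
  by_cases h4 : major = "Anthropology"
  · subst h4; decide
  by_cases h5 : major = "Anth"
  · subst h5; decide
  by_cases h6 : major = "Linguistics"
  · subst h6; decide
  by_cases h7 : major = "ling"
  · subst h7; decide
  by_cases h8 : major = "Music"
  · subst h8; decide
  by_cases h9 : major = "Business"
  · subst h9; decide
  by_cases h10 : major = "Aerospace Engineering"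
  · subst h10; decide
  by_cases h11 : major = "Aerospace"
  · subst h11; decide
  by_cases h12 : major = "Physics"
  · subst h12; decide
  by_cases h13 : major = "Archeology"
  · subst h13; decide
  by_cases h14 : major = "English"
  · subst h14; decide
  by_cases h15 : major = "Political Science"
  · subst h15; decide
  by_cases h16 : major = "PolSci"
  · subst h16; decide
  by_cases h17 : major = "Cognitive Science"
  · subst h17; decide
  by_cases h18 : major = "CogSci"
  · subst h18; decide
  by_cases h19 : major = "Literature"
  · subst h19; decide
  by_cases h20 : major = "Lit"
  · subst h20; decide
  by_cases h21 : major = "Computer Science"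
  · subst h21; decide
  by_cases h22 : major = "CS"
  · subst h22; decide
  by_cases h23 : major = "CSE"
  · subst h23; decide
  by_cases h24 : major = "CompSci"
  · subst h24; decide
  by_cases h25 : major = "Electrical Engineering"
  · subst h25; decide
  by_cases h26 : major = "EE"
  · subst h26; decide
  by_cases h27 : major = "Computer engineering"
  · subst h27; decide
  by_cases h28 : major = "CE"
  · subst h28; decide
  by_cases h29 : major = "Data Science"
  · subst h29; decide
  by_cases h30 : major = "DS"
  · subst h30; decide
  by_cases h31 : major = "Data analysis"
  · subst h31; decide
  by_cases h32 : major = "Statistics"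
  · subst h32; decide
  by_cases h33 : major = "Stats"
  · subst h33; decide
  by_cases h34 : major = "Psychology"
  · subst h34; decide
  by_cases h35 : major = "Psych"
  · subst h35; decide
  by_cases h36 : major = "Communications"
  · subst h36; decide
  by_cases h37 : major = "Comm"
  · subst h37; decide
  by_cases h38 : major = "Biology"
  · subst h38; decide
  by_cases h39 : major = "Bio"
  · subst h39; decide
  by_cases h40 : major = "Chemistry"
  · subst h40; decide
  by_cases h41 : major = "Chem"
  · subst h41; decide
  by_cases h42 : major = "Economics"
  · subst h42; decide
  by_cases h43 : major = "Econ"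
  · subst h43; decide
  by_cases h44 : major = "Environmental Systems"
  · subst h44; decide
  by_cases h45 : major = "ES"
  · subst h45; decide
  by_cases h46 : major = "Art"
  · subst h46; decide
  by_cases h47 : major = "Math-Computer Science"
  · subst h47; decide
  by_cases h48 : major = "Math-CS"
  · subst h48; decide
  by_cases h49 : major = "Math-CompSci"
  · subst h49; decide
  by_cases h50 : major = "Neuroscience"
  · subst h50; decide
  by_cases h51 : major = "Sociology"
  · subst h51; decide
  by_cases h52 : major = "Undeclared"
  · subst h52; decide
  by_cases h53 : major = "Studio"
  · subst h53; decide
  by_cases h54 : major = "ICAM"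
  · subst h54; decide
  simp only [remap_flattened, remap_flattened_alt, known_majors, pvLoopA, pvInnerA,
    pvCanonical, PySem.Dict.getD, PySem.Dict.get?_mk_cons]
  simp only [beq_iff_eq]
  rw [if_neg h0, if_neg (show ¬("Mathehatics" = major) from fun h => h0 h.symm)]
  rw [if_neg h1, if_neg (show ¬("Math" = major) from fun h => h1 h.symm)]
  rw [if_neg h2, if_neg (show ¬("Biochemistry" = major) from fun h => h2 h.symm)]
  rw [if_neg h3, if_neg (show ¬("BioChem" = major) from fun h => h3 h.symm)]
  rw [if_neg h4, if_neg (show ¬("Anthropology" = major) from fun h => h4 h.symm)]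
  rw [if_neg h5, if_neg (show ¬("Anth" = major) from fun h => h5 h.symm)]
  rw [if_neg h6, if_neg (show ¬("Linguistics" = major) from fun h => h6 h.symm)]
  rw [if_neg h7, if_neg (show ¬("ling" = major) from fun h => h7 h.symm)]
  rw [if_neg h8, if_neg (show ¬("Music" = major) from fun h => h8 h.symm)]
  rw [if_neg h9, if_neg (show ¬("Business" = major) from fun h => h9 h.symm)]
  rw [if_neg h10, if_neg (show ¬("Aerospace Engineering" = major) from fun h => h10 h.symm)]
  rw [if_neg h11, if_neg (show ¬("Aerospace" = major) from fun h => h11 h.symm)]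
  rw [if_neg h12, if_neg (show ¬("Physics" = major) from fun h => h12 h.symm)]
  rw [if_neg h13, if_neg (show ¬("Archeology" = major) from fun h => h13 h.symm)]
  rw [if_neg h14, if_neg (show ¬("English" = major) from fun h => h14 h.symm)]
  rw [if_neg h15, if_neg (show ¬("Political Science" = major) from fun h => h15 h.symm)]
  rw [if_neg h16, if_neg (show ¬("PolSci" = major) from fun h => h16 h.symm)]
  rw [if_neg h17, if_neg (show ¬("Cognitive Science" = major) from fun h => h17 h.symm)]
  rw [if_neg h18, if_neg (show ¬("CogSci" = major) from fun h => h18 h.symm)]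
  rw [if_neg h19, if_neg (show ¬("Literature" = major) from fun h => h19 h.symm)]
  rw [if_neg h20, if_neg (show ¬("Lit" = major) from fun h => h20 h.symm)]
  rw [if_neg h21, if_neg (show ¬("Computer Science" = major) from fun h => h21 h.symm)]
  rw [if_neg h22, if_neg (show ¬("CS" = major) from fun h => h22 h.symm)]
  rw [if_neg h23, if_neg (show ¬("CSE" = major) from fun h => h23 h.symm)]
  rw [if_neg h24, if_neg (show ¬("CompSci" = major) from fun h => h24 h.symm)]
  rw [if_neg h25, if_neg (show ¬("Electrical Engineering" = major) from fun h => h25 h.symm)]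
  rw [if_neg h26, if_neg (show ¬("EE" = major) from fun h => h26 h.symm)]
  rw [if_neg h27, if_neg (show ¬("Computer engineering" = major) from fun h => h27 h.symm)]
  rw [if_neg h28, if_neg (show ¬("CE" = major) from fun h => h28 h.symm)]
  rw [if_neg h29, if_neg (show ¬("Data Science" = major) from fun h => h29 h.symm)]
  rw [if_neg h30, if_neg (show ¬("DS" = major) from fun h => h30 h.symm)]
  rw [if_neg h31, if_neg (show ¬("Data analysis" = major) from fun h => h31 h.symm)]
  rw [if_neg h32, if_neg (show ¬("Statistics" = major) from fun h => h32 h.symm)]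
  rw [if_neg h33, if_neg (show ¬("Stats" = major) from fun h => h33 h.symm)]
  rw [if_neg h34, if_neg (show ¬("Psychology" = major) from fun h => h34 h.symm)]
  rw [if_neg h35, if_neg (show ¬("Psych" = major) from fun h => h35 h.symm)]
  rw [if_neg h36, if_neg (show ¬("Communications" = major) from fun h => h36 h.symm)]
  rw [if_neg h37, if_neg (show ¬("Comm" = major) from fun h => h37 h.symm)]
  rw [if_neg h38, if_neg (show ¬("Biology" = major) from fun h => h38 h.symm)]
  rw [if_neg h39, if_neg (show ¬("Bio" = major) from fun h => h39 h.symm)]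
  rw [if_neg h40, if_neg (show ¬("Chemistry" = major) from fun h => h40 h.symm)]
  rw [if_neg h41, if_neg (show ¬("Chem" = major) from fun h => h41 h.symm)]
  rw [if_neg h42, if_neg (show ¬("Economics" = major) from fun h => h42 h.symm)]
  rw [if_neg h43, if_neg (show ¬("Econ" = major) from fun h => h43 h.symm)]
  rw [if_neg h44, if_neg (show ¬("Environmental Systems" = major) from fun h => h44 h.symm)]
  rw [if_neg h45, if_neg (show ¬("ES" = major) from fun h => h45 h.symm)]
  rw [if_neg h46, if_neg (show ¬("Art" = major) from fun h => h46 h.symm)]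
  rw [if_neg h47, if_neg (show ¬("Math-Computer Science" = major) from fun h => h47 h.symm)]
  rw [if_neg h48, if_neg (show ¬("Math-CS" = major) from fun h => h48 h.symm)]
  rw [if_neg h49, if_neg (show ¬("Math-CompSci" = major) from fun h => h49 h.symm)]
  rw [if_neg h50, if_neg (show ¬("Neuroscience" = major) from fun h => h50 h.symm)]
  rw [if_neg h51, if_neg (show ¬("Sociology" = major) from fun h => h51 h.symm)]
  rw [if_neg h52, if_neg (show ¬("Undeclared" = major) from fun h => h52 h.symm)]
  rw [if_neg h53, if_neg (show ¬("Studio" = major) from fun h => h53 h.symm)]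
  rw [if_neg h54, if_neg (show ¬("ICAM" = major) from fun h => h54 h.symm)]
  rfl
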